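-- pv_equiv track=rewrite | github.com/sidthecybertron/info | Information-Security-Lab-master/EX - 2/hillcipher.py | Convert
-- ===== SOURCE A (Python) =====
-- def Convert(p,order):
--     alpha="abcdefghijklmnopqrstuvwxyz"
--     temp=[]
--     mat=[]
--     for i in p:
--         temp.append(alpha.index(i))
--     for j in range(0,len(temp),order):
--         mat.append(temp[j:j+order])
--     return mat
-- ===== SOURCE B (Python) =====
-- def Convert(p, order):
--     alpha = "abcdefghijklmnopqrstuvwxyz"
--     mat = []
--     row = []
--     for c in p:
--         row.append(alpha.index(c))
--         if len(row) == order: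
--             mat.append(row)
--             row = []
--     if row:
--         mat.append(row)
--     return mat
-- ===== Notes on version B (the rewrite author's own statement) =====
-- stated objective: alternative
-- what changed: B replaces A's two staged passes (flatten every letter index into temp, then slice temp by range/order) with a single online streaming pass: one loop over p maintains the current row and flushes it into mat each time it fills to `order` elements, with a final flush of the residual row; no index list, no range(), no slicing.
-- intended difference: On order < 0 with nonempty p (a meaningless chunk size no cipher caller passes), A returns [] because range's negative step silently discards the whole input, while B returns every letter index in a single row; B's value preserves the data on this unspecified corner. — e.g. on Convert("ab", -1): A returns [], B returns [[0, 1]]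
import Mathlib
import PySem

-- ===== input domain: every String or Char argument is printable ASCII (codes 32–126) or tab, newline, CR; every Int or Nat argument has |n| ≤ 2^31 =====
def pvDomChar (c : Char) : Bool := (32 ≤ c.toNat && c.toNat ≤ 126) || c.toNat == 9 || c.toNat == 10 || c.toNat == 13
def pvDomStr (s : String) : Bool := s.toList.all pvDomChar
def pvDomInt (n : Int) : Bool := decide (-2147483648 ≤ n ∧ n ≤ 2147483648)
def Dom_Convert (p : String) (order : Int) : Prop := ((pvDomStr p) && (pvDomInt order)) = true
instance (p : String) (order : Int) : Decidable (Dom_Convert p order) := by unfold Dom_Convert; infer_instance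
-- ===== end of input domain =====

-- B replaces A's two staged passes (flatten all indices into temp, then slice temp by range/order)
-- with a single streaming pass that flushes each row into mat as it fills (objective: alternative).

-- shared primitive: alpha.index(c) as a total value (Pre_ guarantees c ∈ alpha, so getD never fires)
def pvAlpha : List Char := "abcdefghijklmnopqrstuvwxyz".toList
def pvIdx (c : Char) : Int := ((PySem.List.index? pvAlpha c).getD 0 : Nat)

-- ===== PORT A =====
def Convert (p : String) (order : Int) : List (List Int) :=
  let temp : List Int := p.toList.foldl (fun acc c => acc ++ [pvIdx c]) []
  (PySem.List.pyRange 0 (temp.length : Int) order).foldl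
    (fun mat j => mat ++ [PySem.List.slice temp (some j) (some (j + order))]) []

-- ===== PORT B =====
def Convert_alt (p : String) (order : Int) : List (List Int) :=
  let s := p.toList.foldl
    (fun (s : List (List Int) × List Int) c =>
      let row := s.2 ++ [pvIdx c]
      if (row.length : Int) = order then (s.1 ++ [row], ([] : List Int)) else (s.1, row))
    ([], [])
  if s.2 ≠ [] then s.1 ++ [s.2] else s.1

-- ===== PRECONDITION & SPEC =====
-- Pre_ excludes exactly where Python A raises: a character outside 'a'..'z' (ValueError from
-- alpha.index) and order = 0 (ValueError from range's zero step).
def Pre_Convert (p : String) (order : Int) : Prop :=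
  p.toList.all (fun c => pvAlpha.contains c) = true ∧ order ≠ 0
instance (p : String) (order : Int) : Decidable (Pre_Convert p order) := by
  unfold Pre_Convert; infer_instance
def pvWitness_Convert : String × Int := ("hello", 2)

-- On order < 0 with nonempty p (a meaningless chunk size no cipher caller passes), A returns []
-- because range's negative step silently discards the whole input, while B returns every letter
-- index in a single row; B's value preserves the data on this unspecified corner.
def D_Convert (p : String) (order : Int) : Prop := order < 0 ∧ p ≠ ""
instance (p : String) (order : Int) : Decidable (D_Convert p order) := by
  unfold D_Convert; infer_instance

def Spec_Convert (p : String) (order : Int) (out : List (List Int)) : Prop := ¬ D_Convert p order → out = Convert_alt p order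
instance (p : String) (order : Int) (out : List (List Int)) : Decidable (Spec_Convert p order out) := by unfold Spec_Convert; infer_instance
def pvDiffWitness_Convert : String × Int := ("ab", -1)
def pvDiffWitnessOut_Convert : (List (List Int)) × (List (List Int)) := ([], [[0, 1]])

-- ===== CLAIM (what is proved, stated in full; the proofs are below) =====
def Claim_unchanged_Convert : Prop := ∀ (p : String) (order : Int), Dom_Convert p order → Pre_Convert p order → Spec_Convert p order (Convert p order)
def Claim_changed_Convert : Prop := Dom_Convert (pvDiffWitness_Convert.1) (pvDiffWitness_Convert.2) ∧ Pre_Convert (pvDiffWitness_Convert.1) (pvDiffWitness_Convert.2) ∧ D_Convert (pvDiffWitness_Convert.1) (pvDiffWitness_Convert.2) ∧ Convert (pvDiffWitness_Convert.1) (pvDiffWitness_Convert.2) = pvDiffWitnessOut_Convert.1 ∧ Convert_alt (pvDiffWitness_Convert.1) (pvDiffWitness_Convert.2) = pvDiffWitnessOut_Convert.2 ∧ pvDiffWitnessOut_Convert.1 ≠ pvDiffWitnessOut_Convert.2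
def Claim_exact_Convert : Prop := ∀ (p : String) (order : Int), Dom_Convert p order → Pre_Convert p order → D_Convert p order → Convert p order ≠ Convert_alt p order

-- ===== LEMMAS AND PROOFS =====

theorem pv_pyRange_cons (a b s : Int) (hs : 0 < s) (hab : a < b) :
    PySem.List.pyRange a b s = a :: PySem.List.pyRange (a + s) b s := by
  rw [PySem.List.pyRange_of_pos a b hs, PySem.List.pyRange_of_pos (a + s) b hs]
  have h2 : (b - a + s - 1) / s = (b - a - 1) / s + 1 := by
    have h1 : b - a + s - 1 = (b - a - 1) + 1 * s := by ring
    rw [h1, Int.add_mul_ediv_right _ _ hs.ne']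
  have h3 : 0 ≤ (b - a - 1) / s := Int.ediv_nonneg (by omega) hs.le
  have h4 : ((b - a + s - 1) / s).toNat = ((b - a - 1) / s).toNat + 1 := by omega
  rw [if_pos hab, h4, List.range_succ_eq_map, List.map_cons, List.map_map]
  congr 1
  · simp
  · by_cases hc : a + s < b
    · have h5 : b - (a + s) + s - 1 = b - a - 1 := by ring
      rw [if_pos hc, h5]
      apply List.map_congr_left
      intro n _
      simp only [Function.comp_apply]
      push_cast
      ring
    · have h6 : (b - a - 1) / s = 0 := Int.ediv_eq_zero_of_lt (by omega) (by omega)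
      rw [if_neg hc, h6]
      simp

theorem pv_pyRange_shift (a b c s : Int) (hs : 0 < s) :
    PySem.List.pyRange (a + c) (b + c) s = (PySem.List.pyRange a b s).map (· + c) := by
  rw [PySem.List.pyRange_of_pos _ _ hs, PySem.List.pyRange_of_pos _ _ hs, List.map_map]
  have h1 : b + c - (a + c) = b - a := by ring
  have hiff : (a + c < b + c) ↔ (a < b) := by omega
  rw [h1]
  by_cases hab : a < b
  · rw [if_pos (hiff.mpr hab), if_pos hab]
    apply List.map_congr_left
    intro n _
    simp only [Function.comp_apply]
    ring
  · rw [if_neg (fun h => hab (hiff.mp h)), if_neg hab]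
    simp

def pvChunks (k : Nat) : List Int → List (List Int)
  | [] => []
  | x :: xs => (x :: xs.take k) :: pvChunks k (xs.drop k)
termination_by l => l.length
decreasing_by simp

theorem pv_A_chunks (k : Nat) (l : List Int) :
    ((PySem.List.pyRange 0 (l.length : Int) ((k : Int) + 1)).map
      (fun j => PySem.List.slice l (some j) (some (j + ((k : Int) + 1))))) = pvChunks k l := by
  match l with
  | [] =>
    rw [pvChunks.eq_1]
    simp [PySem.List.pyRange_of_pos 0 0 (by omega : (0 : Int) < (k : Int) + 1)]
  | x :: xs =>
    have hs : (0 : Int) < (k : Int) + 1 := by omega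
    have hlen : (0 : Int) < ((x :: xs).length : Int) := by simp
    rw [pv_pyRange_cons 0 _ _ hs hlen, List.map_cons]
    have hhead : PySem.List.slice (x :: xs) (some 0) (some (0 + ((k : Int) + 1)))
        = x :: xs.take k := by
      rw [zero_add, PySem.List.slice_zero_start, PySem.List.slice_to _ hs.le]
      have : ((k : Int) + 1).toNat = k + 1 := by omega
      rw [this, List.take_succ_cons]
    set l' := xs.drop k with hl'
    have hl'len : l'.length = xs.length - k := by simp [hl']
    have htail : PySem.List.pyRange (0 + ((k : Int) + 1)) ((x :: xs).length : Int) ((k : Int) + 1)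
        = (PySem.List.pyRange 0 (l'.length : Int) ((k : Int) + 1)).map (· + ((k : Int) + 1)) := by
      rw [← pv_pyRange_shift 0 _ ((k : Int) + 1) _ hs]
      by_cases hc : k ≤ xs.length
      · have he : (l'.length : Int) + ((k : Int) + 1) = ((x :: xs).length : Int) := by
          rw [hl'len]; simp; omega
        rw [zero_add, he]
      · have h1 : PySem.List.pyRange (0 + ((k : Int) + 1)) ((x :: xs).length : Int) ((k : Int) + 1) = [] := by
          rw [PySem.List.pyRange_of_pos _ _ hs, if_neg (by simp; omega)]
          simp
        have h2 : PySem.List.pyRange ((0 : Int) + ((k : Int) + 1)) ((l'.length : Int) + ((k : Int) + 1)) ((k : Int) + 1) = [] := by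
          rw [PySem.List.pyRange_of_pos _ _ hs, if_neg (by rw [hl'len]; omega)]
          simp
        rw [h1, h2]
    rw [htail, List.map_map]
    have hslice : ∀ j ∈ PySem.List.pyRange 0 (l'.length : Int) ((k : Int) + 1),
        ((fun j => PySem.List.slice (x :: xs) (some j) (some (j + ((k : Int) + 1)))) ∘ (· + ((k : Int) + 1))) j
          = PySem.List.slice l' (some j) (some (j + ((k : Int) + 1))) := by
      intro j hj
      have hj0 : 0 ≤ j := ((PySem.List.mem_pyRange_iff_of_pos hs j).mp hj).1
      simp only [Function.comp_apply]
      rw [PySem.List.slice_toNat _ (by omega) (by omega),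
          PySem.List.slice_toNat _ hj0 (by omega)]
      have e1 : (j + ((k : Int) + 1)).toNat = (k + 1) + j.toNat := by omega
      rw [e1]
      have e2 : (j + ((k : Int) + 1) + ((k : Int) + 1)).toNat - (k + 1 + j.toNat) = k + 1 := by omega
      have e3 : k + 1 + j.toNat - j.toNat = k + 1 := by omega
      have e4 : k + 1 + j.toNat = (k + j.toNat) + 1 := by omega
      rw [e2, e3, e4, List.drop_succ_cons, hl', List.drop_drop]
    rw [List.map_congr_left hslice, pv_A_chunks k l', hhead, pvChunks.eq_2, hl']
termination_by l.length
decreasing_by simp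

theorem pv_B_inv (k : Nat) (l : List Int) :
    ∀ (mat : List (List Int)) (row : List Int), row.length < k + 1 →
    (let s := l.foldl
        (fun (s : List (List Int) × List Int) c =>
          let row := s.2 ++ [c]
          if (row.length : Int) = (k : Int) + 1 then (s.1 ++ [row], ([] : List Int)) else (s.1, row))
        (mat, row)
     if s.2 ≠ [] then s.1 ++ [s.2] else s.1) = mat ++ pvChunks k (row ++ l) := by
  induction l with
  | nil =>
    intro mat row hrow
    match row with
    | [] => simp [pvChunks.eq_1]
    | y :: ys =>
      simp only [List.foldl_nil, List.append_nil]
      rw [if_pos (by simp)]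
      rw [pvChunks.eq_2]
      have h1 : ys.take k = ys := List.take_of_length_le (by simp at hrow; omega)
      have h2 : ys.drop k = [] := List.drop_of_length_le (by simp at hrow; omega)
      rw [h1, h2, pvChunks.eq_1]
  | cons c rest ih =>
    intro mat row hrow
    simp only [List.foldl_cons]
    by_cases hfull : (((row ++ [c]).length : Nat) : Int) = (k : Int) + 1
    · rw [if_pos hfull]
      have hflen : (row ++ [c]).length = k + 1 := by exact_mod_cast hfull
      have hrec := ih (mat ++ [row ++ [c]]) [] (by simp)
      simp only [List.nil_append] at hrec
      rw [hrec, List.append_assoc]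
      congr 1
      have hcons : row ++ c :: rest = (row ++ [c]) ++ rest := by simp
      rw [hcons]
      obtain ⟨z, zs, hrc⟩ : ∃ z zs, row ++ [c] = z :: zs := by
        cases hq : row ++ [c] with
        | nil => simp at hq
        | cons z zs => exact ⟨z, zs, rfl⟩
      have hzs : zs.length = k := by
        have h := hflen; rw [hrc] at h; simp at h; omega
      have h1 : (zs ++ rest).take k = zs := by rw [← hzs]; exact List.take_left
      have h2 : (zs ++ rest).drop k = rest := by rw [← hzs]; exact List.drop_left
      rw [hrc]
      conv_rhs => rw [List.cons_append, pvChunks.eq_2]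
      rw [h1, h2]
      simp
    · rw [if_neg hfull]
      have hlt : (row ++ [c]).length < k + 1 := by
        have hle : (row ++ [c]).length ≤ k + 1 := by simp; omega
        rcases lt_or_eq_of_le hle with h | h
        · exact h
        · exact absurd (by exact_mod_cast h) hfull
      have hrec := ih mat (row ++ [c]) hlt
      rw [hrec]
      congr 2
      simp


-- range(a, a, s) is empty for every step
theorem pv_pyRange_self (a s : Int) : PySem.List.pyRange a a s = [] := by
  simp [PySem.List.pyRange]

-- A's whole loop over range(0, len l, k+1): foldl → map → pvChunks
theorem pv_A_top (k : Nat) (l : List Int) :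
    (PySem.List.pyRange 0 (l.length : Int) ((k : Int) + 1)).foldl
      (fun mat j => mat ++ [PySem.List.slice l (some j) (some (j + ((k : Int) + 1)))]) []
      = pvChunks k l := by
  rw [PySem.List.foldl_append_singleton_eq_map, List.nil_append, pv_A_chunks]

-- B's whole loop over the characters: fold over cl with pvIdx = fold over the index list
theorem pv_B_top (k : Nat) (cl : List Char) :
    (let s := cl.foldl
        (fun (s : List (List Int) × List Int) c =>
          let row := s.2 ++ [pvIdx c]
          if (row.length : Int) = (k : Int) + 1 then (s.1 ++ [row], ([] : List Int)) else (s.1, row))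
        ([], [])
     if s.2 ≠ [] then s.1 ++ [s.2] else s.1) = pvChunks k (cl.map pvIdx) := by
  have h := pv_B_inv k (cl.map pvIdx) [] [] (by simp)
  simp only [List.nil_append, List.foldl_map] at h
  exact h

-- range(a, b, s) is empty when s < 0 and a ≤ b
theorem pv_pyRange_neg_nil (a b s : Int) (hs : s < 0) (hab : a ≤ b) :
    PySem.List.pyRange a b s = [] := by
  unfold PySem.List.pyRange
  rw [if_neg (by omega : ¬ s = 0)]
  simp only
  rw [if_neg (by omega : ¬ 0 < s), if_neg (by omega : ¬ b < a)]
  simp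

-- with order < 0 the flush condition of B's loop never fires: the fold only extends the row
theorem pv_B_neg (order : Int) (hneg : order < 0) (l : List Char) :
    ∀ (mat : List (List Int)) (row : List Int),
    l.foldl
      (fun (s : List (List Int) × List Int) c =>
        let row := s.2 ++ [pvIdx c]
        if (row.length : Int) = order then (s.1 ++ [row], ([] : List Int)) else (s.1, row))
      (mat, row) = (mat, row ++ l.map pvIdx) := by
  induction l with
  | nil => intro mat row; simp
  | cons c rest ih =>
    intro mat row
    simp only [List.foldl_cons]
    rw [if_neg (by intro h; omega)]
    rw [ih mat (row ++ [pvIdx c])]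
    simp

-- ===== VERDICT (by name: the statement is the Claim_ definition above) =====
theorem Convert_spec : Claim_unchanged_Convert := by
  intro p order _ hpre
  unfold Spec_Convert
  intro hnd
  rcases hpre with ⟨_, h0⟩
  unfold Convert Convert_alt
  by_cases hpos : 1 ≤ order
  · have hk : order = ((order.toNat - 1 : Nat) : Int) + 1 := by omega
    rw [hk, PySem.List.foldl_append_singleton_eq_map pvIdx p.toList [], List.nil_append]
    rw [pv_A_top (order.toNat - 1) (p.toList.map pvIdx)]
    rw [pv_B_top (order.toNat - 1) p.toList]
  · have hneg : order < 0 := by omega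
    have hemp : p = "" := by
      by_contra hne
      exact hnd ⟨hneg, hne⟩
    subst hemp
    have hnil : ("" : String).toList = [] := by decide
    rw [hnil]
    simp only [List.foldl_nil, List.length_nil, Nat.cast_zero,
      pv_pyRange_self, List.foldl_nil]
    simp

theorem Convert_changed : Claim_changed_Convert := by
  unfold Claim_changed_Convert
  exact ⟨by decide, by decide, by decide, by decide, by decide, by decide⟩

theorem Convert_tight : Claim_exact_Convert := by
  intro p order _ _ hd
  obtain ⟨hneg, hpne⟩ := hd
  have htl : p.toList ≠ [] := fun hnil => hpne (String.toList_eq_nil_iff.mp hnil)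
  have hA : Convert p order = [] := by
    show (PySem.List.pyRange 0 ((p.toList.foldl (fun acc c => acc ++ [pvIdx c]) []).length : Int) order).foldl
      (fun mat j => mat ++ [PySem.List.slice (p.toList.foldl (fun acc c => acc ++ [pvIdx c]) []) (some j) (some (j + order))]) [] = []
    rw [pv_pyRange_neg_nil _ _ _ hneg (Int.natCast_nonneg _)]
    rfl
  have hB : Convert_alt p order = [p.toList.map pvIdx] := by
    unfold Convert_alt
    rw [pv_B_neg order hneg p.toList [] []]
    simp [htl]
  rw [hA, hB]
  simp
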